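-- pv_equiv track=rewrite | github.com/VoxlyHq/retro_voice | process_frames.py | split_current_text
-- ===== SOURCE A (Python) =====
-- def split_current_text(current_text):
--     """
--     split current text into different speakers and dialogues
--     """
--     texts = []
--     text = []
--
--     for word in current_text.split()[1:]:
--         if ":" in word:
--             texts.append(' '.join(text))
--             text = []
--         else:
--             text.append(word)
--     if text:
--         texts.append(' '.join(text))
--     return texts
-- ===== SOURCE B (Python) =====
-- def split_current_text(current_text):
--     """
--     split current text into different speakers and dialogues
--     """
--     words = current_text.split()[1:]
--     delim = [i for i, w in enumerate(words) if ":" in w]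
--     texts = []
--     prev = 0
--     for d in delim:
--         texts.append(' '.join(words[prev:d]))
--         prev = d + 1
--     tail = words[prev:]
--     if tail:
--         texts.append(' '.join(tail))
--     return texts
-- ===== Notes on version B (the rewrite author's own statement) =====
-- stated objective: alternative
-- what changed: B replaces A's single stateful accumulate-and-flush loop with a two-pass index scheme: it first collects the positions of colon tokens, then builds each segment by slicing between consecutive delimiter positions.
import Mathlib
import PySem

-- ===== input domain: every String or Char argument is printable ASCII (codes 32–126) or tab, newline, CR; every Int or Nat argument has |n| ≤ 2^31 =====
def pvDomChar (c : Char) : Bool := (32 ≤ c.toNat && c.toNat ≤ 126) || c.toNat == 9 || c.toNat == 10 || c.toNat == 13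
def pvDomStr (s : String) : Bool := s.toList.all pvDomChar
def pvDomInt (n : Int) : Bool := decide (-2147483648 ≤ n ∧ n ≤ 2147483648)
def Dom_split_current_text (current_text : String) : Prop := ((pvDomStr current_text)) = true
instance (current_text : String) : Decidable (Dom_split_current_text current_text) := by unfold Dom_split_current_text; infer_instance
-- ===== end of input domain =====

-- B replaces A's single accumulate-and-flush loop by a two-pass scheme (collect colon-token
-- positions, then slice between consecutive delimiters); same cost, alternative structure.

-- ===== PORT A =====
-- one step of A's for-loop: state = (texts, text)
def pvStepA (st : List String × List String) (word : String) : List String × List String :=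
  if PySem.Str.isIn ":" word then (st.1 ++ [PySem.Str.join " " st.2], [])
  else (st.1, st.2 ++ [word])

def split_current_text (current_text : String) : List String :=
  let st := (PySem.List.slice (PySem.Str.split₀ current_text) (some 1) none).foldl pvStepA ([], [])
  if st.2.isEmpty then st.1 else st.1 ++ [PySem.Str.join " " st.2]

-- ===== PORT B =====
def split_current_text_alt (current_text : String) : List String :=
  let words := PySem.List.slice (PySem.Str.split₀ current_text) (some 1) none
  let delim := (PySem.List.enumerate words).filterMap
    (fun p => if PySem.Str.isIn ":" p.2 then some p.1 else none)
  let st := delim.foldl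
    (fun (st : List String × Int) d =>
      (st.1 ++ [PySem.Str.join " " (PySem.List.slice words (some st.2) (some d))], d + 1))
    ([], 0)
  let tail := PySem.List.slice words (some st.2) none
  if tail.isEmpty then st.1 else st.1 ++ [PySem.Str.join " " tail]

-- ===== PRECONDITION & SPEC =====
def Spec_split_current_text (current_text : String) (out : List String) : Prop := out = split_current_text_alt current_text
instance (current_text : String) (out : List String) : Decidable (Spec_split_current_text current_text out) := by unfold Spec_split_current_text; infer_instance

-- ===== CLAIM (what is proved, stated in full; the proofs are below) =====
def Claim_equal_split_current_text : Prop := ∀ (current_text : String), Dom_split_current_text current_text → Spec_split_current_text current_text (split_current_text current_text)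

-- ===== LEMMAS AND PROOFS =====

-- canonical reference function: g cur ws = segments of ws split at colon tokens, cur pending
def pvG (cur : List String) : List String → List String
  | [] => if cur.isEmpty then [] else [PySem.Str.join " " cur]
  | w :: ws =>
      if PySem.Str.isIn ":" w then PySem.Str.join " " cur :: pvG [] ws
      else pvG (cur ++ [w]) ws

-- A's loop in terms of pvG
theorem pvA_eq_g (ws : List String) : ∀ (acc cur : List String),
    (let st := ws.foldl pvStepA (acc, cur);
     if st.2.isEmpty then st.1 else st.1 ++ [PySem.Str.join " " st.2]) = acc ++ pvG cur ws := by
  induction ws with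
  | nil => intro acc cur; simp [pvG]; split <;> simp
  | cons w ws ih =>
    intro acc cur
    simp only [List.foldl_cons, pvStepA, pvG]
    by_cases h : PySem.Str.isIn ":" w = true
    · simp only [h, if_pos]
      rw [ih]
      simp
    · simp only [h, Bool.false_eq_true, ite_false]
      rw [ih]

-- B-side helpers for the proof
def pvDelim (s : Int) : List String → List Int
  | [] => []
  | w :: ws => (if PySem.Str.isIn ":" w then [s] else []) ++ pvDelim (s + 1) ws

theorem pvDelim_eq (ws : List String) : ∀ (s : Int),
    (PySem.List.enumerate ws s).filterMap
      (fun p => if PySem.Str.isIn ":" p.2 then some p.1 else none) = pvDelim s ws := by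
  induction ws with
  | nil => intro s; simp [PySem.List.enumerate_nil, pvDelim]
  | cons w ws ih =>
    intro s
    rw [PySem.List.enumerate_cons]
    simp only [List.filterMap_cons, pvDelim]
    by_cases h : PySem.Str.isIn ":" w = true
    · simp only [h, if_pos, List.singleton_append]
      rw [ih]
    · simp only [h, Bool.false_eq_true, ite_false, List.nil_append]
      rw [ih]

-- B's fold+tail in terms of a structural recursion over the delimiter list
def pvBgo (words : List String) (p : Int) : List Int → List String
  | [] => let tail := PySem.List.slice words (some p) none;
          if tail.isEmpty then [] else [PySem.Str.join " " tail]
  | d :: ds => PySem.Str.join " " (PySem.List.slice words (some p) (some d)) :: pvBgo words (d + 1) ds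

theorem pvB_fold_eq_bgo (words : List String) (ds : List Int) : ∀ (acc : List String) (p : Int),
    (let st := ds.foldl
        (fun (st : List String × Int) d =>
          (st.1 ++ [PySem.Str.join " " (PySem.List.slice words (some st.2) (some d))], d + 1))
        (acc, p);
     let tail := PySem.List.slice words (some st.2) none;
     if tail.isEmpty then st.1 else st.1 ++ [PySem.Str.join " " tail]) = acc ++ pvBgo words p ds := by
  induction ds with
  | nil => intro acc p; simp only [List.foldl_nil, pvBgo]; split <;> simp
  | cons d ds ih =>
    intro acc p
    simp only [List.foldl_cons, pvBgo]
    rw [ih]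
    simp

-- the central invariant: slicing from absolute positions reproduces pvG
theorem pvBgo_eq_g (ws : List String) : ∀ (pref cur : List String),
    pvBgo (pref ++ cur ++ ws) (pref.length : Int)
      (pvDelim ((pref.length : Int) + (cur.length : Int)) ws) = pvG cur ws := by
  induction ws with
  | nil =>
    intro pref cur
    simp only [pvDelim, pvBgo, pvG, List.append_nil]
    rw [PySem.List.slice_from_natCast]
    simp
  | cons w ws ih =>
    intro pref cur
    by_cases h : PySem.Str.isIn ":" w = true
    · simp only [pvDelim, h, if_pos, List.singleton_append, pvBgo, pvG]
      have hsl : PySem.List.slice (pref ++ cur ++ (w :: ws)) (some (pref.length : Int))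
          (some ((pref.length : Int) + (cur.length : Int))) = cur := by
        have : ((pref.length : Int) + (cur.length : Int)) = ((pref.length + cur.length : Nat) : Int) := by
          push_cast; ring
        rw [this, PySem.List.slice_natCast]
        simp
      rw [hsl]
      have h2 := ih (pref ++ cur ++ [w]) []
      simp only [List.append_nil, List.length_nil, Nat.cast_zero, add_zero] at h2
      have harr : pref ++ cur ++ (w :: ws) = (pref ++ cur ++ [w]) ++ ws := by simp
      have hlen : (pref.length : Int) + (cur.length : Int) + 1
          = (((pref ++ cur ++ [w]).length : Nat) : Int) := by
        push_cast [List.length_append, List.length_singleton]; ring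
      rw [harr, hlen, h2]
    · simp only [pvDelim, h, Bool.false_eq_true, ite_false, List.nil_append, pvG]
      have h2 := ih pref (cur ++ [w])
      have harr : pref ++ cur ++ (w :: ws) = pref ++ (cur ++ [w]) ++ ws := by simp
      have hlen : (pref.length : Int) + (cur.length : Int) + 1
          = ((pref.length : Nat) : Int) + (((cur ++ [w]).length : Nat) : Int) := by
        push_cast [List.length_append, List.length_singleton]; ring
      rw [harr, hlen, h2]

-- ===== VERDICT (by name: the statement is the Claim_ definition above) =====
theorem split_current_text_spec : Claim_equal_split_current_text := by
  intro current_text _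
  unfold Spec_split_current_text split_current_text split_current_text_alt
  set words := PySem.List.slice (PySem.Str.split₀ current_text) (some 1) none with hw
  have hA := pvA_eq_g words [] []
  have hD := pvDelim_eq words 0
  have hB := pvB_fold_eq_bgo words (pvDelim 0 words) [] 0
  have hG := pvBgo_eq_g words [] []
  simp only [List.nil_append] at hA hB hG
  simp only [hA, hD, hB]
  simpa using hG.symm
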